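-- pv_equiv track=rewrite | github.com/mosessmax/mivatest | min_max_rearrange.py | alternate_min_max_rearrangement
-- ===== SOURCE A (Python) =====
-- def alternate_min_max_rearrangement(arr):
--     if not arr:
--         return []
--
--     sorted_arr = sorted(arr)
--     result = []
--     left = 0
--     right = len(sorted_arr) - 1
--
--     # alternate between picking smallest and largest
--     pick_smallest = True
--
--     while left <= right:
--         if pick_smallest:
--             result.append(sorted_arr[left])
--             left += 1
--         else:
--             result.append(sorted_arr[right])
--             right -= 1
--
--         pick_smallest = not pick_smallest
--
--     return result
-- ===== SOURCE B (Python) =====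
-- def alternate_min_max_rearrangement(arr):
--     s = sorted(arr)
--     m = (len(s) + 1) // 2
--     result = [None] * len(s)
--     result[::2] = s[:m]
--     result[1::2] = s[m:][::-1]
--     return result
-- ===== Notes on version B (the rewrite author's own statement) =====
-- stated objective: idiomatic
-- what changed: Replaces the two-pointer while loop with a boolean toggle by two strided slice assignments: the lower half of the sorted list goes to even indices and the reversed upper half to odd indices.
import Mathlib
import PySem

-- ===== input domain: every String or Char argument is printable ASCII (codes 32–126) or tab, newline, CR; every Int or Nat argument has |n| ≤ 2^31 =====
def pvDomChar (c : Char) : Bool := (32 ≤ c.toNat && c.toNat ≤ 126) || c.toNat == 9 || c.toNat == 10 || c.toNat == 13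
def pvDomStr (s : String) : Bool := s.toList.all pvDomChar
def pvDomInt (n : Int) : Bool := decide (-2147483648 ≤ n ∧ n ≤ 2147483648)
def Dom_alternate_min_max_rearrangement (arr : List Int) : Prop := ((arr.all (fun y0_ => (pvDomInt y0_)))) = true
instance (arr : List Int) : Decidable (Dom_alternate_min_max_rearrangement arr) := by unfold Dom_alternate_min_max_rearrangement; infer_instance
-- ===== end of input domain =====

-- B replaces A's two-pointer while loop (boolean toggle) by two strided slice
-- assignments on a preallocated list (idiomatic; same output, same cost).

-- ===== PORT A =====
-- the while loop of A: state (left, right, pick_smallest); fuel bounds the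
-- number of iterations (each iteration shrinks right - left by one, so
-- s.length + 1 iterations always suffice)
def pvLoopA (s : List Int) : Nat → Int → Int → Bool → List Int
  | 0, _, _, _ => []
  | fuel + 1, l, r, pick =>
    if l ≤ r then
      if pick then
        PySem.List.pyGetD s l 0 :: pvLoopA s fuel (l + 1) r false
      else
        PySem.List.pyGetD s r 0 :: pvLoopA s fuel l (r - 1) true
    else []

def alternate_min_max_rearrangement (arr : List Int) : List Int :=
  if arr = [] then []
  else
    let sorted_arr := PySem.List.sorted arr (fun x => x) false
    pvLoopA sorted_arr (sorted_arr.length + 1) 0 ((sorted_arr.length : Int) - 1) true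

-- ===== PORT B =====
-- the two strided slice assignments result[::2] = s[:m], result[1::2] = s[m:][::-1]
-- are ported exactly as the interleaving they perform (evens from the first list,
-- odds from the second; lengths match by the choice of m)
def pvWeave : List Int → List Int → List Int
  | [], ys => ys
  | x :: xs, ys => x :: pvWeave ys xs
termination_by xs ys => xs.length + ys.length
decreasing_by simp; omega

def alternate_min_max_rearrangement_alt (arr : List Int) : List Int :=
  let s := PySem.List.sorted arr (fun x => x) false
  let m := (s.length + 1) / 2
  pvWeave (s.take m) ((s.drop m).reverse)

-- ===== PRECONDITION & SPEC =====
def Spec_alternate_min_max_rearrangement (arr : List Int) (out : List Int) : Prop := out = alternate_min_max_rearrangement_alt arr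
instance (arr : List Int) (out : List Int) : Decidable (Spec_alternate_min_max_rearrangement arr out) := by unfold Spec_alternate_min_max_rearrangement; infer_instance

-- ===== CLAIM (what is proved, stated in full; the proofs are below) =====
def Claim_equal_alternate_min_max_rearrangement : Prop := ∀ (arr : List Int), Dom_alternate_min_max_rearrangement arr → Spec_alternate_min_max_rearrangement arr (alternate_min_max_rearrangement arr)

-- ===== LEMMAS AND PROOFS =====

-- reference form of the front/back alternation, by structural recursion
mutual
  def pvAlt : List Int → List Int
    | [] => []
    | x :: xs => x :: pvAltBack xs
  termination_by t => t.length
  def pvAltBack : List Int → List Int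
    | [] => []
    | x :: xs => (x :: xs).getLast (by simp) :: pvAlt ((x :: xs).dropLast)
  termination_by t => t.length
  decreasing_by all_goals simp
end

theorem pvLoopA_eq_pvAlt (fuel : Nat) :
    ∀ (t s : List Int) (a : Nat) (pick : Bool),
      t.length ≤ fuel →
      (s.drop a).take t.length = t →
      a + t.length ≤ s.length →
      pvLoopA s fuel (a : Int) ((a : Int) + t.length - 1) pick
        = (if pick then pvAlt t else pvAltBack t) := by
  induction fuel with
  | zero =>
    intro t s a pick hf ht _
    have : t = [] := by
      cases t with
      | nil => rfl
      | cons x xs => simp at hf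
    subst this
    cases pick <;> simp [pvLoopA, pvAlt, pvAltBack]
  | succ fuel ih =>
    intro t s a pick hf ht hlen
    cases t with
    | nil =>
      have : ¬ ((a : Int) ≤ (a : Int) + 0 - 1) := by omega
      cases pick <;> simp [pvLoopA, pvAlt, pvAltBack, this]
    | cons x xs =>
      have hn : (x :: xs).length = xs.length + 1 := by simp
      have hle : (a : Int) ≤ (a : Int) + (x :: xs).length - 1 := by
        simp only [hn]; push_cast; omega
      have halen : a < s.length := by simp at hlen; omega
      -- elements via getElem: t[i] = s[a+i]
      have hget : ∀ i (hi : i < (x :: xs).length), s[a + i]'(by omega) = (x :: xs)[i] := by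
        intro i hi
        have : ((s.drop a).take (x :: xs).length)[i]'(by rw [ht]; exact hi) = (x :: xs)[i] := by
          simp only [ht]
        simpa [List.getElem_take, List.getElem_drop] using this
      cases pick with
      | true =>
        have hx : PySem.List.pyGetD s (a : Int) 0 = x := by
          rw [PySem.List.pyGetD_natCast]
          have := hget 0 (by simp)
          simp at this
          simp [List.getD, List.getElem?_eq_getElem halen, this]
        have hrec : pvLoopA s fuel ((a : Int) + 1) ((a : Int) + (x :: xs).length - 1) false
            = pvAltBack xs := by
          have htail : (s.drop (a + 1)).take xs.length = xs := by
            have h1 : s.drop a = x :: (s.drop (a + 1)) := by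
              have := hget 0 (by simp)
              simp at this
              rw [List.drop_eq_getElem_cons halen]
              simp [this]
            have : (s.drop a).take (xs.length + 1) = x :: xs := by simpa using ht
            rw [h1] at this
            simpa using this
          have := ih xs s (a + 1) false (by simp at hf; omega) htail (by simp at hlen ⊢; omega)
          have hrw : ((a : Int) + 1) + (xs.length : Int) - 1 = (a : Int) + (x :: xs).length - 1 := by
            simp; ring
          push_cast at this ⊢
          rw [← hrw]
          simpa using this
        simp only [pvLoopA, if_pos hle, if_pos, pvAlt]
        rw [hx, hrec]
      | false =>
        -- back step: pick the last element t[n-1] = s[a + n - 1]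
        have hlast : PySem.List.pyGetD s ((a : Int) + (x :: xs).length - 1) 0
            = (x :: xs).getLast (by simp) := by
          have hidx : (a : Int) + (x :: xs).length - 1 = ((a + xs.length : Nat) : Int) := by
            simp; ring
          rw [hidx, PySem.List.pyGetD_natCast]
          have hlt : a + xs.length < s.length := by simp at hlen; omega
          have := hget xs.length (by simp)
          simp [List.getD, List.getElem?_eq_getElem hlt, this, List.getLast_eq_getElem]
          rfl
        have hrec : pvLoopA s fuel (a : Int) ((a : Int) + (x :: xs).length - 1 - 1) true
            = pvAlt ((x :: xs).dropLast) := by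
          have hdl : (x :: xs).dropLast = (x :: xs).take xs.length := by
            rw [List.dropLast_eq_take]; simp
          have htake : (s.drop a).take ((x :: xs).dropLast).length = (x :: xs).dropLast := by
            rw [hdl]
            have : ((s.drop a).take ((x::xs).length)).take xs.length = (x :: xs).take xs.length := by
              rw [ht]
            rw [List.take_take] at this
            simpa [Nat.min_def] using this
          have := ih ((x :: xs).dropLast) s a true (by simp at hf ⊢; omega) htake
            (by simp at hlen ⊢; omega)
          have hrw : (a : Int) + (((x :: xs).dropLast).length : Int) - 1
              = (a : Int) + (x :: xs).length - 1 - 1 := by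
            simp; ring
          rw [← hrw]
          simpa using this
        simp only [pvLoopA, if_pos hle, if_neg (by simp : ¬ (false = true)), pvAltBack]
        rw [hlast, hrec]

theorem pv_dropLast_drop (l : List Int) (k : Nat) :
    (l.drop k).dropLast = l.dropLast.drop k := by
  rw [List.dropLast_eq_take, List.dropLast_eq_take, List.drop_take]
  congr 1
  simp
  omega

theorem pvWeave_eq_pvAlt (n : Nat) :
    ∀ (t : List Int), t.length = n →
      pvWeave (t.take ((t.length + 1) / 2)) ((t.drop ((t.length + 1) / 2)).reverse) = pvAlt t := by
  induction n using Nat.strong_induction_on with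
  | _ n ih =>
    intro t hlen
    cases t with
    | nil => simp [pvWeave, pvAlt]
    | cons x xs =>
      cases hxs : xs with
      | nil => simp [pvWeave, pvAlt, pvAltBack]
      | cons y ys =>
        subst hxs
        set u := (y :: ys).dropLast with hu
        have hnn : (x :: y :: ys).length = ys.length + 2 := by simp
        set N := ys.length + 2 with hN
        have hm1 : (N + 1) / 2 = (N - 1) / 2 + 1 := by omega
        have hmlt : (N + 1) / 2 < N := by omega
        have hulen : u.length = ys.length := by simp [hu]
        -- take m (x :: xs) = x :: take (m-1) xs
        have htake : (x :: y :: ys).take ((N + 1) / 2) = x :: (y :: ys).take ((N - 1) / 2) := by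
          rw [hm1]; simp
        -- drop m (x::xs) = drop (m-1) (y::ys), nonempty
        have hdrop : (x :: y :: ys).drop ((N + 1) / 2) = (y :: ys).drop ((N - 1) / 2) := by
          rw [hm1]; simp
        have hdne : (y :: ys).drop ((N - 1) / 2) ≠ [] := by
          intro h
          have := congrArg List.length h
          simp at this
          omega
        -- reverse of a nonempty list = last :: reverse dropLast
        have hrev : ((y :: ys).drop ((N - 1) / 2)).reverse
            = (y :: ys).getLast (by simp) :: (u.drop ((N - 1) / 2)).reverse := by
          have h1 : ((y :: ys).drop ((N - 1) / 2)).dropLast = u.drop ((N - 1) / 2) := by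
            rw [hu]
            exact pv_dropLast_drop (y :: ys) ((N - 1) / 2)
          have h2 : ((y :: ys).drop ((N - 1) / 2)).getLast hdne = (y :: ys).getLast (by simp) := by
            rw [List.getLast_drop]
          conv_lhs => rw [← List.dropLast_concat_getLast hdne]
          rw [List.reverse_append, h1, h2]
          simp
        -- take (m-1) (y::ys) = take (m-1) u
        have htu : (y :: ys).take ((N - 1) / 2) = u.take ((N - 1) / 2) := by
          rw [hu, List.dropLast_eq_take, List.take_take]
          congr 1
          simp
          omega
        have hIH : pvWeave (u.take ((u.length + 1) / 2)) ((u.drop ((u.length + 1) / 2)).reverse)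
            = pvAlt u := ih u.length (by rw [hulen, ← hlen]; simp) u rfl
        have humod : (u.length + 1) / 2 = (N - 1) / 2 := by rw [hulen]; omega
        rw [humod] at hIH
        calc pvWeave ((x :: y :: ys).take (((x :: y :: ys).length + 1) / 2))
              (((x :: y :: ys).drop (((x :: y :: ys).length + 1) / 2)).reverse)
            = pvWeave (x :: (y :: ys).take ((N - 1) / 2))
                ((y :: ys).getLast (by simp) :: (u.drop ((N - 1) / 2)).reverse) := by
              rw [hnn, htake, hdrop, hrev]
          _ = x :: (y :: ys).getLast (by simp)
                :: pvWeave (u.take ((N - 1) / 2)) ((u.drop ((N - 1) / 2)).reverse) := by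
              rw [pvWeave, pvWeave, htu]
          _ = x :: (y :: ys).getLast (by simp) :: pvAlt u := by rw [hIH]
          _ = pvAlt (x :: y :: ys) := by rw [pvAlt, pvAltBack]

-- ===== VERDICT (by name: the statement is the Claim_ definition above) =====
theorem alternate_min_max_rearrangement_spec : Claim_equal_alternate_min_max_rearrangement := by
  intro arr _
  unfold Spec_alternate_min_max_rearrangement alternate_min_max_rearrangement
    alternate_min_max_rearrangement_alt
  by_cases h : arr = []
  · subst h
    simp [PySem.List.sorted, pvWeave]
  · simp only [if_neg h]
    set s := PySem.List.sorted arr (fun x => x) false with hs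
    have hA : pvLoopA s (s.length + 1) ((0 : Nat) : Int) (((0 : Nat) : Int) + s.length - 1) true
        = pvAlt s :=
      pvLoopA_eq_pvAlt (s.length + 1) s s 0 true (by omega) (by simp) (by simp)
    have hB := pvWeave_eq_pvAlt s.length s rfl
    simp only [Nat.cast_zero, zero_add] at hA
    rw [hA, hB]
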